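-- pv_equiv track=rewrite | github.com/masarina/DaijinAi | ServerSide/BallPassSchedulePattern/Players_QrcodeReaderTypes/Scan_b_TrapezoidCorrectionPlayerDir/TrapezoidCorrectionPlayer.py | find_left_right_edges
-- ===== SOURCE A (Python) =====
-- def find_left_right_edges(row):
--     left_edge = None
--     right_edge = None
--
--     # 左端のビット1を探すループ
--     for i, bit in enumerate(row):
--         if bit == 1:
--             left_edge = i
--             break
--
--     # 右端のビット1を探すループ（逆順で検索）
--     for i, bit in enumerate(reversed(row)):
--         if bit == 1:
--             right_edge = len(row) - 1 - i
--             break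
--
--     # ビット1がない場合、行全体が0なので両端を設定
--     if left_edge is None or right_edge is None:
--         left_edge = 0
--         right_edge = len(row) - 1
--
--     return left_edge, right_edge
-- ===== SOURCE B (Python) =====
-- def find_left_right_edges(row):
--     ones = [i for i, bit in enumerate(row) if bit == 1]
--     if ones:
--         return ones[0], ones[-1]
--     return 0, len(row) - 1
-- ===== Notes on version B (the rewrite author's own statement) =====
-- stated objective: alternative
-- what changed: A scans from both ends with two early-break loops; B makes one full pass collecting all indices of 1 and returns the first and last of that list (falling back to (0, len(row)-1) when none).
import Mathlib
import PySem

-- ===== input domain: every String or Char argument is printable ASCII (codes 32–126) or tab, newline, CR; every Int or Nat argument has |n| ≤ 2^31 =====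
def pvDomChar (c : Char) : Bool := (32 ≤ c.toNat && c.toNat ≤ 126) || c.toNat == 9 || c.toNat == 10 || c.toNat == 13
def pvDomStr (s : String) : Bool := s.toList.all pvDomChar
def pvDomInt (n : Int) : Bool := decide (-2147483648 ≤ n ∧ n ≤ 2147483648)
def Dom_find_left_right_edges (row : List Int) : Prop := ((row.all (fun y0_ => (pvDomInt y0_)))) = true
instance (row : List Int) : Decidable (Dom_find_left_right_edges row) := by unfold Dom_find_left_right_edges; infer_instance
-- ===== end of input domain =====

-- B replaces A's two opposite-end early-break scans by one full pass that collects every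
-- index holding 1 and returns that list's first and last element (alternative decomposition).

-- ===== PORT A =====
-- the early-break 'for i, bit in enumerate(...)' loops: first index (counted from start s) with bit == 1
def pvScan1 : List Int → Int → Option Int
  | [], _ => none
  | b :: t, i => if b == 1 then some i else pvScan1 t (i + 1)

def find_left_right_edges (row : List Int) : Int × Int :=
  let left_edge : Option Int := pvScan1 row 0
  -- second loop runs over reversed(row); on a hit at i the edge is len(row) - 1 - i
  let right_edge : Option Int := (pvScan1 row.reverse 0).map (fun i => (row.length : Int) - 1 - i)
  match left_edge, right_edge with
  | some l, some r => (l, r)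
  | _, _ => (0, (row.length : Int) - 1)

-- ===== PORT B =====
def find_left_right_edges_alt (row : List Int) : Int × Int :=
  let ones : List Int := ((PySem.List.enumerate row 0).filter (fun p => p.2 == 1)).map (fun p => p.1)
  match ones with
  | [] => (0, (row.length : Int) - 1)
  | l :: rest => (l, (l :: rest).getLast (by simp))

-- ===== PRECONDITION & SPEC =====
def Spec_find_left_right_edges (row : List Int) (out : Int × Int) : Prop := out = find_left_right_edges_alt row
instance (row : List Int) (out : Int × Int) : Decidable (Spec_find_left_right_edges row out) := by unfold Spec_find_left_right_edges; infer_instance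

-- ===== CLAIM (what is proved, stated in full; the proofs are below) =====
def Claim_equal_find_left_right_edges : Prop := ∀ (row : List Int), Dom_find_left_right_edges row → Spec_find_left_right_edges row (find_left_right_edges row)

-- ===== LEMMAS AND PROOFS =====

def pvOnes (l : List Int) (s : Int) : List Int :=
  ((PySem.List.enumerate l s).filter (fun p => p.2 == 1)).map (fun p => p.1)

theorem pvOnes_nil (s : Int) : pvOnes [] s = [] := by
  simp [pvOnes, PySem.List.enumerate]

theorem pvOnes_cons (b : Int) (t : List Int) (s : Int) :
    pvOnes (b :: t) s = (if b = 1 then [s] else []) ++ pvOnes t (s + 1) := by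
  simp [pvOnes, PySem.List.enumerate_cons]
  split_ifs with h <;> simp [h]

theorem pvScan1_eq_head (l : List Int) (s : Int) :
    pvScan1 l s = (pvOnes l s).head? := by
  induction l generalizing s with
  | nil => simp [pvScan1, pvOnes_nil]
  | cons b t ih => rw [pvOnes_cons]; by_cases h : b = 1 <;> simp [pvScan1, h, ih]

theorem pvScan1_shift (l : List Int) (s : Int) :
    pvScan1 l s = (pvScan1 l 0).map (fun i => i + s) := by
  induction l generalizing s with
  | nil => simp [pvScan1]
  | cons b t ih =>
    by_cases h : b = 1
    · simp [pvScan1, h]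
    · have hb : (b == 1) = false := by simpa using h
      simp only [pvScan1, hb, Bool.false_eq_true, if_false]
      rw [ih (s + 1), ih (0 + 1), Option.map_map]
      congr 1; funext i; simp; ring

theorem pvOnes_append (l m : List Int) (s : Int) :
    pvOnes (l ++ m) s = pvOnes l s ++ pvOnes m (s + l.length) := by
  induction l generalizing s with
  | nil => simp [pvOnes_nil]
  | cons b t ih =>
    rw [List.cons_append, pvOnes_cons, pvOnes_cons, ih]
    simp; ring_nf

theorem pvScan1_rev_eq_getLast (l : List Int) :
    (pvScan1 l.reverse 0).map (fun i => (l.length : Int) - 1 - i) = (pvOnes l 0).getLast? := by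
  induction l using List.reverseRecOn with
  | nil => simp [pvScan1, pvOnes_nil]
  | append_singleton t b ih =>
    rw [pvOnes_append, List.reverse_append]
    by_cases h : b = 1
    · simp [pvScan1, pvOnes_cons, pvOnes_nil, h]
    · have hb : (b == 1) = false := by simpa using h
      simp only [List.reverse_singleton, List.singleton_append, pvScan1, hb,
        Bool.false_eq_true, if_false, pvOnes_cons, if_neg h, pvOnes_nil]
      rw [pvScan1_shift, Option.map_map]
      simp only [List.append_nil]
      rw [← ih]
      congr 1; funext i; simp; ring

-- ===== VERDICT (by name: the statement is the Claim_ definition above) =====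
theorem find_left_right_edges_spec : Claim_equal_find_left_right_edges := by
  intro row _
  unfold Spec_find_left_right_edges find_left_right_edges find_left_right_edges_alt
  rw [show ((PySem.List.enumerate row 0).filter (fun p => p.2 == 1)).map (fun p => p.1) = pvOnes row 0 from rfl]
  rw [pvScan1_eq_head, pvScan1_rev_eq_getLast]
  cases h : pvOnes row 0 with
  | nil => simp
  | cons a t => simp [List.getLast?_eq_some_getLast (l := a :: t) (by simp)]
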